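-- pv_equiv track=rewrite | github.com/duyanh213-ml/leetcode_practice | medium/406 Queue Reconstruction By Height/my_solution.py | __createHDict
-- ===== SOURCE A (Python) =====
-- def __createHDict(k_list: list[int], people: list[list[int]]):
--     h_dict = {}
--
--     for k in k_list:
--         h_dict[k] = []
--
--     for person in people:
--         h_dict[person[1]].append(person[0])
--
--     for key in h_dict.keys():
--         h_dict[key] = sorted(h_dict[key], reverse=True)
--
--     return h_dict
-- ===== SOURCE B (Python) =====
-- def __createHDict(k_list: list[int], people: list[list[int]]):
--     # one dict comprehension: for each distinct k (first-occurrence order),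
--     # collect the heights of the people with that k and sort them descending
--     return {k: sorted((p[0] for p in people if p[1] == k), reverse=True)
--             for k in dict.fromkeys(k_list)}
-- ===== Notes on version B (the rewrite author's own statement) =====
-- stated objective: alternative
-- what changed: Replaces A's three mutation passes over a shared dict (initialise, distribute by append, re-sort every bucket in place) by a single dict comprehension that, for each distinct key of k_list, filters the matching people and sorts their heights once.
import Mathlib
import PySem

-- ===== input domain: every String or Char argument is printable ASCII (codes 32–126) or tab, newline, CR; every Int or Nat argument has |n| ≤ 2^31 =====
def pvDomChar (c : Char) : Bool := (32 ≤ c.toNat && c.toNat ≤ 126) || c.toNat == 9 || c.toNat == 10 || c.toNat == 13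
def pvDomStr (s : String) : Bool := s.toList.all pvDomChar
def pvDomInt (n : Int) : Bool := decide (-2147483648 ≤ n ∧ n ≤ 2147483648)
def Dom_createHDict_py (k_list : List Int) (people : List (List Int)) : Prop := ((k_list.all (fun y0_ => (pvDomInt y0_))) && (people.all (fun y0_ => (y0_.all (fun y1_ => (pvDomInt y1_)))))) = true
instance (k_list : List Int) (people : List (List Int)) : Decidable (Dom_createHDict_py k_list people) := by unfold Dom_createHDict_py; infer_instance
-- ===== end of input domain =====

-- B replaces A's three mutation passes over a shared dict by one dict comprehension
-- (filter the matching people per distinct key, sort once); equal output on Pre_ proved below.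


-- ===== PORT A =====
def createHDict_py (k_list : List Int) (people : List (List Int)) : List (Int × List Int) :=
  -- h_dict = {}; for k in k_list: h_dict[k] = []
  let d0 : PySem.Dict Int (List Int) :=
    k_list.foldl (fun d k => d.insert k ([] : List Int)) PySem.Dict.empty
  -- for person in people: h_dict[person[1]].append(person[0])
  -- (Pre_ guarantees person[1] is an existing key, so d[k].append = modify at a present key)
  let d1 : PySem.Dict Int (List Int) :=
    people.foldl
      (fun d person =>
        d.modify (PySem.List.pyGetD person 1 0) []
          (fun l => l ++ [PySem.List.pyGetD person 0 0])) d0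
  -- for key in h_dict.keys(): h_dict[key] = sorted(h_dict[key], reverse=True)
  (d1.keys.foldl
    (fun d key => d.insert key (PySem.List.sorted (d.getD key []) (fun x => x) true)) d1).items

-- ===== PORT B =====
def createHDict_py_alt (k_list : List Int) (people : List (List Int)) : List (Int × List Int) :=
  -- {k: sorted((p[0] for p in people if p[1] == k), reverse=True) for k in dict.fromkeys(k_list)}
  (PySem.List.dedup k_list).map (fun k =>
    (k, PySem.List.sorted
          ((people.filter (fun p => PySem.List.pyGetD p 1 0 == k)).map
            (fun p => PySem.List.pyGetD p 0 0))
          (fun x => x) true))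

-- ===== PRECONDITION & SPEC =====
-- Pre_ excludes exactly the inputs where the Python A raises: a person shorter than two
-- entries (IndexError on person[1] / person[0]) or a person whose person[1] was not put
-- in the dict by the k_list loop (KeyError).
def Pre_createHDict_py (k_list : List Int) (people : List (List Int)) : Prop :=
  ∀ p ∈ people, 2 ≤ p.length ∧ p.getD 1 0 ∈ k_list
instance (k_list : List Int) (people : List (List Int)) : Decidable (Pre_createHDict_py k_list people) := by unfold Pre_createHDict_py; infer_instance

def pvWitness_createHDict_py : List Int × List (List Int) :=
  ([0, 1, 2], [[7, 0], [5, 0], [6, 1], [7, 1]])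

def Spec_createHDict_py (k_list : List Int) (people : List (List Int)) (out : List (Int × List Int)) : Prop := out = createHDict_py_alt k_list people
instance (k_list : List Int) (people : List (List Int)) (out : List (Int × List Int)) : Decidable (Spec_createHDict_py k_list people out) := by unfold Spec_createHDict_py; infer_instance

-- ===== CLAIM (what is proved, stated in full; the proofs are below) =====
def Claim_equal_createHDict_py : Prop := ∀ (k_list : List Int) (people : List (List Int)), Dom_createHDict_py k_list people → Pre_createHDict_py k_list people → Spec_createHDict_py k_list people (createHDict_py k_list people)

-- ===== LEMMAS AND PROOFS =====

-- the pair (person[1], person[0]) the distribution loop works with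
def pvPair (p : List Int) : Int × Int := (PySem.List.pyGetD p 1 0, PySem.List.pyGetD p 0 0)

-- the bucket a list ps of people contributes to key c, in traversal order
def pvBucket (ps : List (List Int)) (c : Int) : List Int :=
  ((ps.map pvPair).filter (fun q => q.1 == c)).map (fun q => q.2)

-- the bucket is B's per-key comprehension
theorem pvBucket_eq_filter (ps : List (List Int)) (c : Int) :
    pvBucket ps c
      = (ps.filter (fun p => PySem.List.pyGetD p 1 0 == c)).map
          (fun p => PySem.List.pyGetD p 0 0) := by
  unfold pvBucket
  rw [List.filter_map, List.map_map]
  rfl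

-- every value in the initialisation dict is []
theorem pvGetD_init (ks : List Int) (d : PySem.Dict Int (List Int))
    (h : ∀ c, d.getD c [] = []) (c : Int) :
    (ks.foldl (fun d k => d.insert k ([] : List Int)) d).getD c [] = [] := by
  induction ks generalizing d with
  | nil => exact h c
  | cons k ks ih =>
      refine ih _ (fun c => ?_)
      rw [PySem.Dict.getD_insert]
      split <;> simp [h]

-- updating a set with elements it already has leaves it unchanged
theorem pvSet_update_eq_self (s : PySem.Set Int) (l : List Int)
    (h : ∀ x ∈ l, x ∈ s) : PySem.Set.update s l = s := by
  induction l generalizing s with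
  | nil => rfl
  | cons x l ih =>
      have hx : PySem.Set.add s x = s := PySem.Set.add_of_mem (h x (by simp))
      show PySem.Set.update (PySem.Set.add s x) l = s
      rw [hx]
      exact ih s (fun y hy => h y (by simp [hy]))

-- the distribution loop (modify-append keyed by person[1]) appends pvBucket to each value
theorem pvGetD_distribute (ps : List (List Int)) (d : PySem.Dict Int (List Int)) (c : Int) :
    (ps.foldl
      (fun d person =>
        d.modify (PySem.List.pyGetD person 1 0) []
          (fun l => l ++ [PySem.List.pyGetD person 0 0])) d).getD c []
      = d.getD c [] ++ pvBucket ps c := by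
  have hmap := PySem.Dict.getD_foldl_modify_append (ps.map pvPair) d c
  rw [List.foldl_map] at hmap
  exact hmap

-- A's final per-key sort loop: with Nodup keys it sorts each value of d once
theorem pvGetD_sortLoop (ks : List Int) (d : PySem.Dict Int (List Int))
    (hnd : ks.Nodup) (c : Int) :
    (ks.foldl
      (fun d key => d.insert key (PySem.List.sorted (d.getD key []) (fun x => x) true)) d).getD c []
      = if c ∈ ks then PySem.List.sorted (d.getD c []) (fun x => x) true else d.getD c [] := by
  induction ks generalizing d with
  | nil => simp
  | cons k ks ih =>
      simp only [List.foldl_cons, List.nodup_cons] at hnd ⊢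
      rw [ih _ hnd.2]
      by_cases hc : c ∈ ks
      · have hck : c ≠ k := fun h => hnd.1 (h ▸ hc)
        simp [hc, PySem.Dict.getD_insert, hck]
      · by_cases hck : c = k
        · subst hck
          simp [hc]
        · simp [hc, hck, PySem.Dict.getD_insert]

theorem createHDict_py_eq (k_list : List Int) (people : List (List Int))
    (hpre : Pre_createHDict_py k_list people) :
    createHDict_py k_list people = createHDict_py_alt k_list people := by
  unfold createHDict_py createHDict_py_alt
  set d0 : PySem.Dict Int (List Int) :=
    k_list.foldl (fun d k => d.insert k ([] : List Int)) PySem.Dict.empty with hd0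
  set d1 : PySem.Dict Int (List Int) :=
    people.foldl
      (fun d person =>
        d.modify (PySem.List.pyGetD person 1 0) []
          (fun l => l ++ [PySem.List.pyGetD person 0 0])) d0 with hd1
  set d2 : PySem.Dict Int (List Int) :=
    d1.keys.foldl
      (fun d key => d.insert key (PySem.List.sorted (d.getD key []) (fun x => x) true)) d1 with hd2
  -- key facts about the initialisation dict d0
  have hk0 : d0.keys = PySem.List.dedup k_list := by
    rw [hd0, PySem.Dict.keys_foldl_insert, PySem.List.dedup_eq_ofList]
    rfl
  have hnd0 : d0.keys.Nodup := by
    rw [hk0]; exact PySem.List.nodup_dedup k_list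
  have hget0 : ∀ c, d0.getD c [] = [] := by
    intro c; rw [hd0]; exact pvGetD_init _ _ (fun c => PySem.Dict.getD_empty ..) c
  have hkeymem : ∀ p ∈ people, PySem.List.pyGetD p 1 0 ∈ d0.keys := by
    intro p hp
    rw [PySem.List.pyGetD_ofNat' p 1 0, hk0, PySem.List.mem_dedup]
    exact (hpre p hp).2
  -- the distribution loop keeps exactly the keys of d0
  have hk1 : d1.keys = d0.keys := by
    rw [hd1, PySem.Dict.keys_foldl_modify_key people
      (fun person => PySem.List.pyGetD person 1 0) []
      (fun _ person => fun l => l ++ [PySem.List.pyGetD person 0 0]) d0]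
    exact pvSet_update_eq_self _ _ (by simpa using hkeymem)
  have hk2 : d2.keys = d0.keys := by
    rw [hd2, PySem.Dict.keys_foldl_insert d1.keys
      (fun d key => PySem.List.sorted (d.getD key []) (fun x => x) true) d1, hk1]
    exact pvSet_update_eq_self _ _ (fun x hx => hx)
  have hnd1 : d1.keys.Nodup := hk1 ▸ hnd0
  have hnd2 : d2.keys.Nodup := hk2 ▸ hnd0
  -- per-key values are B's per-key comprehension
  have hval : ∀ c ∈ d0.keys, d2.getD c []
      = PySem.List.sorted
          ((people.filter (fun p => PySem.List.pyGetD p 1 0 == c)).map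
            (fun p => PySem.List.pyGetD p 0 0)) (fun x => x) true := by
    intro c hc
    have h1 : d1.getD c [] = pvBucket people c := by
      rw [hd1, pvGetD_distribute, hget0, List.nil_append]
    have h2 : d2.getD c [] = PySem.List.sorted (d1.getD c []) (fun x => x) true := by
      rw [hd2, pvGetD_sortLoop d1.keys d1 hnd1 c]
      simp [hk1, hc]
    rw [h2, h1, pvBucket_eq_filter]
  -- items of A's dict = B's map over the deduped keys
  rw [PySem.Dict.items_eq_map_keys d2 hnd2 [], hk2, hk0]
  exact List.map_congr_left (fun k hk => by rw [hval k (hk0 ▸ hk)])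

-- ===== VERDICT (by name: the statement is the Claim_ definition above) =====
theorem createHDict_py_spec : Claim_equal_createHDict_py := by
  intro k_list people _ hpre
  exact createHDict_py_eq k_list people hpre
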